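-- pv_equiv track=rewrite | github.com/Pygramer78/mathematical-functions | dict-functions.py | count
-- ===== SOURCE A (Python) =====
-- def count(s):
--     dicti = {}
--     ggs = [c for c in s.lower() if c not in " ., "]
--     for c in ggs:
--         if c in dicti:
--             dicti[c] += 1
--         else:
--             dicti[c] = 1
--     return dicti
-- ===== SOURCE B (Python) =====
-- def count(s):
--     ggs = [c for c in s.lower() if c not in " ., "]
--
--     def go(lst):
--         if not lst:
--             return {}
--         c = lst[0]
--         rest = [x for x in lst if x != c]
--         d = {c: len(lst) - len(rest)}
--         d.update(go(rest))
--         return d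
--
--     return go(ggs)
-- ===== Notes on version B (the rewrite author's own statement) =====
-- stated objective: alternative
-- what changed: B replaces A's incremental branch-and-increment dict loop by a recursive partition: count the first character's occurrences as the length drop when filtering them out, then recurse on the remainder, so first-appearance key order falls out of the recursion.
import Mathlib
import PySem

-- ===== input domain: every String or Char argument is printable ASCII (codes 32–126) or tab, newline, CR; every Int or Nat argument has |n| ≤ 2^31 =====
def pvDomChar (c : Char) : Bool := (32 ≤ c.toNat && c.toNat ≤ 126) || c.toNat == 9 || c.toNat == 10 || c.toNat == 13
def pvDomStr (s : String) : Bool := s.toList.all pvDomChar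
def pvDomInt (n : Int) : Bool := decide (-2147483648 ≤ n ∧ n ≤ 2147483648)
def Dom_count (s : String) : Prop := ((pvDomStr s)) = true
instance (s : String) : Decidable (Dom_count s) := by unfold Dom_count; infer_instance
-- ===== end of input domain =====

-- B: recursive partition — count the head's occurrences as the length drop after filtering them out, recurse on the remainder (same value and first-appearance order as A's counter loop).
-- ===== PORT A =====
-- ggs = [c for c in s.lower() if c not in " ., "]  (each 1-char string; 'c in " ., "' on a 1-char c is exactly char membership in {' ', '.', ','})
def pvFilteredA (s : String) : List String :=
  (((PySem.Str.lower s).toList.filter (fun c => !(c == ' ' || c == '.' || c == ','))).map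
    (fun c => String.ofList [c]))

def count (s : String) : List (String × Int) :=
  ((pvFilteredA s).foldl
    (fun dicti c =>
      if dicti.contains c then dicti.insert c (dicti.getD c 0 + 1)
      else dicti.insert c 1)
    (PySem.Dict.empty : PySem.Dict String Int)).items

-- ===== PORT B =====
-- go(lst): c = lst[0]; rest = [x for x in lst if x != c]; {c: len(lst)-len(rest)} then the recursion's dict appended (fresh keys)
def pvGo : List String → List (String × Int)
  | [] => []
  | c :: t =>
    let rest := (c :: t).filter (fun x => x ≠ c)
    (c, ((c :: t).length : Int) - (rest.length : Int)) :: pvGo rest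
  termination_by l => l.length
  decreasing_by
    simp only [List.filter_cons, decide_not, List.length_cons]
    have h : (t.filter (fun x => !decide (x = c))).length ≤ t.length := List.length_filter_le _ _
    split <;> simp_all

def count_alt (s : String) : List (String × Int) :=
  pvGo (((PySem.Str.lower s).toList.filter (fun c => !(c == ' ' || c == '.' || c == ','))).map
    (fun c => String.ofList [c]))

-- ===== PRECONDITION & SPEC =====
def Spec_count (s : String) (out : List (String × Int)) : Prop := out = count_alt s
instance (s : String) (out : List (String × Int)) : Decidable (Spec_count s out) := by unfold Spec_count; infer_instance

-- ===== CLAIM =====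
def Claim_equal_count : Prop := ∀ (s : String), Dom_count s → Spec_count s (count s)

-- ===== LEMMAS AND PROOFS =====
theorem foldl_eq_counter (l : List String) :
    l.foldl (fun (d : PySem.Dict String Int) c =>
        if d.contains c then d.insert c (d.getD c 0 + 1) else d.insert c 1) PySem.Dict.empty
      = PySem.Dict.counter l := by
  have hf : (fun (d : PySem.Dict String Int) c =>
      if d.contains c then d.insert c (d.getD c 0 + 1) else d.insert c 1)
      = fun (d : PySem.Dict String Int) c => d.insert c (d.getD c 0 + 1) := by
    funext d c
    by_cases h : d.contains c = true
    · simp [h]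
    · simp only [Bool.not_eq_true] at h
      simp [h, PySem.Dict.getD_of_not_contains]
  rw [hf, PySem.Dict.foldl_insert_getD_add_one_eq_counter]

theorem foldl_add_filter {α : Type} [DecidableEq α] (c : α) :
    ∀ (u : List α) (s : PySem.Set α), c ∈ s →
      List.foldl PySem.Set.add s u = List.foldl PySem.Set.add s (u.filter (fun x => x ≠ c))
  | [], s, _ => rfl
  | x :: u, s, hc => by
    by_cases hx : x = c
    · subst hx
      have hadd : PySem.Set.add s x = s := by
        simp [PySem.Set.add, PySem.Set.contains, hc]
      rw [List.filter_cons, if_neg (by simp)]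
      simp only [List.foldl_cons, hadd]
      exact foldl_add_filter x u s hc
    · rw [List.filter_cons, if_pos (by simp [hx])]
      simp only [List.foldl_cons]
      exact foldl_add_filter c u (PySem.Set.add s x)
        (by simp [PySem.Set.add]; split <;> simp [hc])

theorem foldl_add_cons {α : Type} [DecidableEq α] (c : α) :
    ∀ (u : List α) (s : PySem.Set α), c ∉ u →
      List.foldl PySem.Set.add (c :: s) u = c :: List.foldl PySem.Set.add s u
  | [], _, _ => rfl
  | x :: u, s, hc => by
    have hxc : x ≠ c := by intro h; exact hc (h ▸ List.mem_cons_self ..)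
    have hadd : PySem.Set.add (c :: s) x = c :: PySem.Set.add s x := by
      simp only [PySem.Set.add, PySem.Set.contains, List.contains_cons]
      have : (x == c) = false := by simp [hxc]
      rw [this]
      simp only [Bool.false_or]
      split <;> simp
    simp only [List.foldl_cons, hadd]
    exact foldl_add_cons c u (PySem.Set.add s x) (fun h => hc (List.mem_cons_of_mem _ h))

theorem ofList_cons_filter {α : Type} [DecidableEq α] (c : α) (t : List α) :
    PySem.Set.ofList (c :: t) = c :: PySem.Set.ofList (t.filter (fun x => x ≠ c)) := by
  rw [PySem.Set.ofList_eq_foldl, PySem.Set.ofList_eq_foldl]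
  have h0 : List.foldl PySem.Set.add ([] : PySem.Set α) (c :: t)
      = List.foldl PySem.Set.add [c] t := by
    simp [PySem.Set.add, PySem.Set.contains]
  rw [h0, foldl_add_filter c t [c] (List.mem_cons_self ..)]
  exact foldl_add_cons c _ [] (by simp)

theorem pvGo_eq_items (l : List String) :
    pvGo l = (PySem.Set.ofList l).map (fun k => (k, (l.count k : Int))) := by
  fun_induction pvGo l with
  | case1 => rfl
  | case2 c t rest ih =>
    have hrest : rest = t.filter (fun x => x ≠ c) := by
      simp [rest]
    rw [ofList_cons_filter]
    simp only [List.map_cons, ← hrest, ih]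
    congr 1
    · -- head: length drop = count of c
      congr 1
      have hlen : ∀ u : List String, u.length = (u.filter (fun x => x ≠ c)).length + u.count c := by
        intro u
        induction u with
        | nil => simp
        | cons a u ihu =>
          by_cases h : a = c <;> simp [h, ihu] <;> omega
      have hc : (c :: t).count c = t.count c + 1 := by simp
      have hl := hlen t
      simp only [hrest, List.length_cons, hc]
      push_cast
      omega
    · -- tail: counts of k ≠ c agree between l and the filtered list
      apply List.map_congr_left
      intro k hk
      have hkne : k ≠ c := by
        have := (PySem.Set.mem_ofList _ _).mp hk
        rw [hrest] at this
        simp only [List.mem_filter, decide_eq_true_eq] at this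
        exact this.2
      have h1 : (c :: t).count k = t.count k := by simp [Ne.symm hkne]
      have h2 : (t.filter (fun x => x ≠ c)).count k = t.count k := by
        rw [List.count_filter]
        simp [hkne]
      rw [← hrest] at h2
      rw [h1, ← h2]

-- ===== VERDICT =====
theorem count_spec : Claim_equal_count := by
  intro s _
  unfold Spec_count count count_alt pvFilteredA
  rw [foldl_eq_counter, PySem.Dict.items_counter, pvGo_eq_items]
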